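-- pv_equiv track=rewrite | github.com/maxcrave/SSC | app01/views.py | filter_danma
-- ===== SOURCE A (Python) =====
-- def filter_danma(All_number,danma_1):
--     SSC_NUMBER = []
--
--     temp1 = []
--     count = 0
--     for number in All_number:
--         for n in danma_1:
--             count = number.count(n)
--             if count >=1 :
--                 temp1.append(number)
--                 break
--
--     # 过滤 1234情况
--     SSC_NUMBER_DICT = {}
--     for number in temp1:
--         SSC_NUMBER_DICT[number] = {}
--         for n in danma_1:
--             SSC_NUMBER_DICT[number].update({n:number.count(n)})
--
--     for number,v_dict in SSC_NUMBER_DICT.items():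
--         temp2_count = 0
--         for k,v in v_dict.items():
--             if v == 1:
--                 temp2_count += 1
--         if temp2_count != 4:
--             SSC_NUMBER.append(number)
--
--     return sorted(SSC_NUMBER)
-- ===== SOURCE B (Python) =====
-- def filter_danma(All_number, danma_1):
--     # One pass, no intermediate dict table: decide each number inline, dedup with a set.
--     danma_set = set(danma_1)
--     keep = set()
--     for number in All_number:
--         if any(number.count(n) >= 1 for n in danma_1):
--             if sum(1 for n in danma_set if number.count(n) == 1) != 4:
--                 keep.add(number)
--     return sorted(keep)
-- ===== Notes on version B (the rewrite author's own statement) =====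
-- stated objective: simpler
-- what changed: B decides each number inline in a single pass over All_number with a result set for dedup, dropping A's intermediate filtered list temp1 and its per-number count dictionary table plus the separate re-scan pass over that table.
import Mathlib
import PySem

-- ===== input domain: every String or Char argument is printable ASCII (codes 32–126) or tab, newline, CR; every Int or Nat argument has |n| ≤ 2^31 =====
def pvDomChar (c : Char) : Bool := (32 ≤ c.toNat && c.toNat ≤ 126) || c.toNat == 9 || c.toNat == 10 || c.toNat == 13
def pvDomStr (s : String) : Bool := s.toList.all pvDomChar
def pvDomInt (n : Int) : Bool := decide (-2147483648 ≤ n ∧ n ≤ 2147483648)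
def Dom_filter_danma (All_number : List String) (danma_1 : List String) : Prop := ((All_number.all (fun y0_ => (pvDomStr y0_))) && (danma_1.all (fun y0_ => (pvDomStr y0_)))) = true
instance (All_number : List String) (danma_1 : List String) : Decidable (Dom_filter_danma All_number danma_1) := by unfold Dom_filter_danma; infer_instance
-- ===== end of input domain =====

-- B merges A's three passes (pre-filter list, per-number count dict, re-scan) into one inline
-- pass with a result set; objective: simpler, same asymptotic cost.

-- ===== PORT A =====
-- inner 'for n in danma_1: … break' appends number once iff some n occurs; ported as List.any

-- ===== PORT A =====
-- inner 'for n in danma_1: … break' appends number once iff some n occurs; ported as List.any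
def filter_danma (All_number : List String) (danma_1 : List String) : List String :=
  let temp1 : List String :=
    All_number.foldl (fun acc number =>
      if danma_1.any (fun n => decide (1 ≤ PySem.Str.count number n)) then acc ++ [number]
      else acc) []
  let ssc_dict : PySem.Dict String (PySem.Dict String Int) :=
    temp1.foldl (fun d number =>
      d.insert number
        (danma_1.foldl (fun inner n => inner.insert n ((PySem.Str.count number n : Int)))
          PySem.Dict.empty)) PySem.Dict.empty
  let ssc : List String :=
    ssc_dict.items.foldl (fun acc nv =>
      let temp2_count : Int :=
        nv.2.items.foldl (fun c kv => if kv.2 = 1 then c + 1 else c) 0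
      if temp2_count ≠ 4 then acc ++ [nv.1] else acc) []
  PySem.List.sorted ssc (fun x => x) false

-- ===== PORT B =====
def filter_danma_alt (All_number : List String) (danma_1 : List String) : List String :=
  let danma_set : PySem.Set String := PySem.Set.ofList danma_1
  let keep : PySem.Set String :=
    All_number.foldl (fun keep number =>
      if danma_1.any (fun n => decide (1 ≤ PySem.Str.count number n)) then
        if (danma_set.countP (fun n => PySem.Str.count number n == 1) : Int) ≠ 4 then
          PySem.Set.add keep number
        else keep
      else keep) PySem.Set.empty
  PySem.List.sorted keep (fun x => x) false

-- ===== PRECONDITION & SPEC =====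
def Spec_filter_danma (All_number : List String) (danma_1 : List String) (out : List String) : Prop := out = filter_danma_alt All_number danma_1
instance (All_number : List String) (danma_1 : List String) (out : List String) : Decidable (Spec_filter_danma All_number danma_1 out) := by unfold Spec_filter_danma; infer_instance

-- ===== CLAIM (what is proved, stated in full; the proofs are below) =====
def Claim_equal_filter_danma : Prop := ∀ (All_number : List String) (danma_1 : List String), Dom_filter_danma All_number danma_1 → Spec_filter_danma All_number danma_1 (filter_danma All_number danma_1)

-- ===== LEMMAS AND PROOFS =====

-- a dict built by inserting x ↦ g x (value depends only on the key): lookup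
theorem get?_foldl_insert_fn {κ ν : Type} [DecidableEq κ] [BEq κ] [LawfulBEq κ]
    (g : κ → ν) (l : List κ) (d : PySem.Dict κ ν) (k : κ) :
    (l.foldl (fun d x => d.insert x (g x)) d).get? k = if k ∈ l then some (g k) else d.get? k := by
  induction l generalizing d with
  | nil => simp
  | cons x xs ih =>
      simp only [List.foldl_cons, ih, List.mem_cons, PySem.Dict.get?_insert]
      by_cases hk : k ∈ xs
      · simp [hk]
      · by_cases hx : k = x <;> simp [hk, hx]

theorem items_foldl_insert_fn {κ ν : Type} [DecidableEq κ] [BEq κ] [LawfulBEq κ]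
    (g : κ → ν) (l : List κ) (dflt : ν) :
    (l.foldl (fun d x => d.insert x (g x)) PySem.Dict.empty).items
      = (PySem.Set.ofList l).map (fun k => (k, g k)) := by
  have hnd : (l.foldl (fun d x => d.insert x (g x)) PySem.Dict.empty).keys.Nodup :=
    PySem.Dict.nodup_keys_foldl_insert l (fun _ x => g x) PySem.Dict.empty (by simp [PySem.Dict.keys_empty])
  rw [PySem.Dict.items_eq_map_keys _ hnd dflt, PySem.Dict.keys_foldl_insert]
  have hkeys : PySem.Set.update (PySem.Dict.empty : PySem.Dict κ ν).keys l = PySem.Set.ofList l := by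
    simp [PySem.Dict.keys_empty, PySem.Set.update_nil_left]
  rw [hkeys]
  refine List.map_congr_left (fun k hk => ?_)
  have hkl : k ∈ l := (PySem.Set.mem_ofList l k).1 hk
  rw [PySem.Dict.getD_eq_get?_getD, get?_foldl_insert_fn, if_pos hkl]; rfl

-- the two tests both programs apply to a number
def pvP (danma_1 : List String) (number : String) : Bool :=
  danma_1.any (fun n => decide (1 ≤ PySem.Str.count number n))

def pvQ (danma_1 : List String) (number : String) : Bool :=
  decide ((((PySem.Set.ofList danma_1).countP (fun n => PySem.Str.count number n == 1) : Int)) ≠ 4)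

theorem filter_danma_eq_sorted_filter (All_number danma_1 : List String) :
    filter_danma All_number danma_1
      = PySem.List.sorted
          ((PySem.Set.ofList (All_number.filter (pvP danma_1))).filter (pvQ danma_1))
          (fun x => x) false := by
  simp only [filter_danma]
  rw [PySem.List.foldl_append_if_eq_filter]
  rw [List.nil_append]
  rw [items_foldl_insert_fn
    (fun number => danma_1.foldl (fun inner n => inner.insert n ((PySem.Str.count number n : Int))) PySem.Dict.empty)
    _ PySem.Dict.empty]
  rw [PySem.List.foldl_append_ite
    (p := fun nv : String × PySem.Dict String Int =>
      (List.foldl (fun c kv => if kv.2 = 1 then c + 1 else c) (0:Int) nv.2.items) ≠ 4)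
    (f := fun nv : String × PySem.Dict String Int => nv.1)]
  rw [List.nil_append]
  rw [List.filter_map, List.map_map]
  have hcomp : ((fun nv : String × PySem.Dict String Int => nv.1) ∘ (fun k => (k, (fun number => danma_1.foldl (fun inner n => inner.insert n ((PySem.Str.count number n : Int))) PySem.Dict.empty) k))) = id := rfl
  rw [hcomp, List.map_id]
  congr 1
  apply List.filter_congr
  intro k hk
  simp only [Function.comp_apply]
  rw [items_foldl_insert_fn (fun n => (PySem.Str.count k n : Int)) danma_1 0]
  rw [PySem.List.foldl_ite_add_one
    (p := fun kv : String × Int => kv.2 = 1)]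
  rw [List.countP_map]
  rw [List.countP_congr (q := fun n => PySem.Str.count k n == 1)
    (by intro n hn; simp [Nat.cast_eq_one])]
  simp [pvQ]

theorem filter_danma_alt_eq_sorted_ofList (All_number danma_1 : List String) :
    filter_danma_alt All_number danma_1
      = PySem.List.sorted
          (PySem.Set.ofList (All_number.filter (fun x => pvP danma_1 x && pvQ danma_1 x)))
          (fun x => x) false := by
  simp only [filter_danma_alt]
  have hbody : ∀ (s : PySem.Set String) (number : String), number ∈ All_number →
      (if (danma_1.any (fun n => decide (1 ≤ PySem.Str.count number n))) = true then
        if ((PySem.Set.ofList danma_1).countP (fun n => PySem.Str.count number n == 1) : Int) ≠ 4 then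
          PySem.Set.add s number
        else s
      else s)
      = (if (pvP danma_1 number && pvQ danma_1 number) = true then PySem.Set.add s number else s) := by
    intro s number _
    by_cases h1 : (danma_1.any (fun n => decide (1 ≤ PySem.Str.count number n))) = true
    · by_cases h2 : ((PySem.Set.ofList danma_1).countP (fun n => PySem.Str.count number n == 1) : Int) ≠ 4
      · rw [if_pos h1, if_pos h2,
          if_pos (by simp only [pvP, pvQ, Bool.and_eq_true]; exact ⟨h1, decide_eq_true h2⟩)]
      · rw [if_pos h1, if_neg h2,
          if_neg (by simp only [pvP, pvQ, Bool.and_eq_true, decide_eq_true_eq]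
                     exact fun h => h2 h.2)]
    · rw [if_neg h1,
        if_neg (by simp only [pvP, pvQ, Bool.and_eq_true, decide_eq_true_eq]
                   exact fun h => h1 h.1)]
  have hfold := PySem.List.foldl_congr_mem
    (l := All_number) (init := (PySem.Set.empty : PySem.Set String))
    (f := fun keep number =>
      if (danma_1.any (fun n => decide (1 ≤ PySem.Str.count number n))) = true then
        if ((PySem.Set.ofList danma_1).countP (fun n => PySem.Str.count number n == 1) : Int) ≠ 4 then
          PySem.Set.add keep number
        else keep
      else keep)
    (g := fun keep number =>
      if (pvP danma_1 number && pvQ danma_1 number) = true then PySem.Set.add keep number else keep)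
    (fun s number h => hbody s number h)
  rw [hfold]
  rw [PySem.List.foldl_if_eq_foldl_filter]
  congr 1

theorem main_eq (All_number danma_1 : List String) :
    filter_danma All_number danma_1 = filter_danma_alt All_number danma_1 := by
  rw [filter_danma_eq_sorted_filter, filter_danma_alt_eq_sorted_ofList]
  have hnodA : ((PySem.Set.ofList (All_number.filter (pvP danma_1))).filter (pvQ danma_1)).Nodup :=
    (PySem.Set.nodup_ofList _).filter _
  have hnodB : (PySem.Set.ofList (All_number.filter (fun x => pvP danma_1 x && pvQ danma_1 x))).Nodup :=
    PySem.Set.nodup_ofList _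
  have hperm : ((PySem.Set.ofList (All_number.filter (pvP danma_1))).filter (pvQ danma_1)).Perm
      (PySem.Set.ofList (All_number.filter (fun x => pvP danma_1 x && pvQ danma_1 x))) := by
    rw [List.perm_ext_iff_of_nodup hnodA hnodB]
    intro x
    simp only [List.mem_filter, PySem.Set.mem_ofList, Bool.and_eq_true]
    tauto
  exact PySem.List.sorted_eq_sorted_of_perm _ _ _ (fun a b h => h) hperm

-- ===== VERDICT (by name: the statement is the Claim_ definition above) =====
theorem filter_danma_spec : Claim_equal_filter_danma := by
  intro All_number danma_1 _
  unfold Spec_filter_danma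
  exact main_eq All_number danma_1
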